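-- pv_equiv track=rewrite | github.com/onurgu/joint-ner-and-md-tagger | utils/loader.py | cap_feature
-- ===== SOURCE A (Python) =====
-- def is_number(s):
--     try:
--         float(s)
--         return True
--     except ValueError:
--         return False
--
-- def cap_feature(s):
--     """
--     Capitalization feature:
--     0 = low caps
--     1 = all caps
--     2 = first letter caps
--     3 = one capital (not first letter)
--     """
--
--     def cap_characterization(input_s):
--         if input_s.lower() == input_s:
--             return 0
--         elif input_s.upper() == input_s:
--             return 1
--         elif input_s[0].upper() == input_s[0]:
--             return 2
--         elif sum([x == y for (x, y) in zip(input_s.upper(), input_s)]) > 0: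
--             return 3
--
--     if is_number(s):
--         return 0
--     elif sum([(str(digit) in s) for digit in range(0, 10)]) > 0:
--         if "'" in s:
--             return 1 + cap_characterization(s)
--         else:
--             return 1 + 4 + cap_characterization(s)
--     else:
--         if "'" in s:
--             return 1 + 8 + cap_characterization(s)
--         else:
--             return 1 + 12 + cap_characterization(s)
-- ===== SOURCE B (Python) =====
-- def is_number(s):
--     try:
--         float(s)
--         return True
--     except ValueError:
--         return False
--
-- def cap_feature(s):
--     # one pass over the characters collecting all four flags, then arithmetic
--     # instead of the nested if/else offset ladder
--     if is_number(s):
--         return 0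
--     has_digit = has_apos = has_upper = has_lower = False
--     for c in s:
--         has_digit = has_digit or c in "0123456789"
--         has_apos = has_apos or c == "'"
--         has_upper = has_upper or c.lower() != c
--         has_lower = has_lower or c.upper() != c
--     if not has_upper:
--         cap = 0
--     elif not has_lower:
--         cap = 1
--     elif s[0].upper() == s[0]:
--         cap = 2
--     else:
--         cap = 3
--     return 1 + (0 if has_digit else 8) + (0 if has_apos else 4) + cap
-- ===== Notes on version B (the rewrite author's own statement) =====
-- stated objective: simpler
-- what changed: Replaces A's four-branch offset ladder (each branch re-scanning the string for digits/apostrophe and calling a three-way string-comparison characterization) by a single pass over the characters maintaining four boolean flags, followed by one arithmetic formula 1 + (0 or 8) + (0 or 4) + cap.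
import Mathlib
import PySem

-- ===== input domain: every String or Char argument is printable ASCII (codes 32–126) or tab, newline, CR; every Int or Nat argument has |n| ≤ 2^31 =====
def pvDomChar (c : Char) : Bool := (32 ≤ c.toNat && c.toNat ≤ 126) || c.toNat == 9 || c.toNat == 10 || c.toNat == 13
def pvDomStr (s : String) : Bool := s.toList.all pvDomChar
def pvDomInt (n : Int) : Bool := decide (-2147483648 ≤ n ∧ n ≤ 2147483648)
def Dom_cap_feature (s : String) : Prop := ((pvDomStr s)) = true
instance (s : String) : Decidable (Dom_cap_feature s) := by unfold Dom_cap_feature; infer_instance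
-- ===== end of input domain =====

-- B replaces A's four-branch offset ladder (each branch re-scanning the string) by one
-- pass over the characters collecting four flags plus an arithmetic formula (objective: simpler).

-- ===== shared helper: port of `float(s)` succeeding (is_number, identical in both Pythons) =====
-- Hand port of CPython's float-literal acceptance (strip whitespace; optional sign; inf/infinity/nan
-- case-insensitively; or digits[.digits][exp] / .digits[exp] with '_' only between digits).
-- Exact on the ASCII domain (checked against CPython by fuzzing); only success/failure is used.

-- consume one digit run `digit ('_'? digit)*`; `none` = no leading digit, else the remainder
def pvDigsTail : List Char → List Char
  | '_' :: c :: r => if c.isDigit then pvDigsTail r else '_' :: c :: r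
  | c :: r => if c.isDigit then pvDigsTail r else c :: r
  | [] => []

def pvDigs : List Char → Option (List Char)
  | c :: r => if c.isDigit then some (pvDigsTail r) else none
  | [] => none

def pvDigsEnd (l : List Char) : Bool :=
  match pvDigs l with
  | some [] => true
  | _ => false

def pvSignedDigsEnd (l : List Char) : Bool :=
  match l with
  | c :: r => if c == '+' || c == '-' then pvDigsEnd r else pvDigsEnd (c :: r)
  | [] => false

-- after the mantissa: end of string, or an exponent part
def pvTailOk : List Char → Bool
  | [] => true
  | c :: r => (c == 'e' || c == 'E') && pvSignedDigsEnd r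

def pvMantissa (l : List Char) : Bool :=
  match pvDigs l with
  | some rest =>
    match rest with
    | '.' :: r2 =>
      (match pvDigs r2 with
       | some r3 => pvTailOk r3
       | none => pvTailOk r2)
    | _ => pvTailOk rest
  | none =>
    match l with
    | '.' :: r2 =>
      (match pvDigs r2 with
       | some r3 => pvTailOk r3
       | none => false)
    | _ => false

def pvNamedFloat (l : List Char) : Bool :=
  let low := l.map PySem.Chars.lowerChar
  low == "inf".toList || low == "infinity".toList || low == "nan".toList

def pvFloatOk (l : List Char) : Bool :=
  let t := PySem.Chars.strip l
  let t2 := match t with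
    | c :: r => if c == '+' || c == '-' then r else c :: r
    | [] => []
  pvNamedFloat t2 || pvMantissa t2

-- is_number(s): True iff float(s) does not raise ValueError
def pvIsNumber (s : String) : Bool := pvFloatOk s.toList

-- ===== PORT A =====
-- sum([(str(digit) in s) for digit in range(0, 10)])
def pvDigitSum (s : String) : Int :=
  ((PySem.List.pyRange 0 10 1).map
    (fun d => if PySem.Str.isIn (PySem.Int.toStr d) s then (1 : Int) else 0)).sum

-- the inner cap_characterization; `none` = Python falls through and returns None
def pvCapCharacterization (s : String) : Option Int :=
  if PySem.Str.lower s == s then some 0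
  else if PySem.Str.upper s == s then some 1
  else
    match PySem.Str.pyGet? s 0 with
    | none => none      -- IndexError on s[0]; unreachable: "" takes the first branch
    | some c0 =>
      if PySem.Chars.upperChar c0 == c0 then some 2
      else if 0 < (((PySem.Str.upper s).toList.zip s.toList).map
                    (fun p => if p.1 == p.2 then (1 : Int) else 0)).sum then some 3
      else none         -- Python returns None here (then 1 + None would raise)

def cap_feature (s : String) : Int :=
  if pvIsNumber s then 0
  else if 0 < pvDigitSum s then
    if PySem.Str.isIn "'" s then 1 + (pvCapCharacterization s).getD 0
    else 1 + 4 + (pvCapCharacterization s).getD 0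
  else
    if PySem.Str.isIn "'" s then 1 + 8 + (pvCapCharacterization s).getD 0
    else 1 + 12 + (pvCapCharacterization s).getD 0
-- `.getD 0` stands where Python would compute `1 + None` (TypeError); proved unreachable on
-- the ASCII domain (the characterization always returns `some` there, see capChar_total below).

-- ===== PORT B =====
-- the cap if/elif chain of Source B (0/1/2/3 from the two case flags and s[0])
def pvCapOf (s : String) (hasUpper hasLower : Bool) : Int :=
  if !hasUpper then 0
  else if !hasLower then 1
  else
    match PySem.Str.pyGet? s 0 with
    | none => 0       -- unreachable: has_upper forces s nonempty
    | some c0 => if PySem.Chars.upperChar c0 == c0 then 2 else 3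

-- the final arithmetic of Source B from the four flags
def pvAfterFlags (s : String) (st : Bool × Bool × Bool × Bool) : Int :=
  1 + (if st.1 then 0 else 8) + (if st.2.1 then 0 else 4) + pvCapOf s st.2.2.1 st.2.2.2

def cap_feature_alt (s : String) : Int :=
  if pvIsNumber s then 0
  else
    -- one pass: (has_digit, has_apos, has_upper, has_lower)
    pvAfterFlags s (s.toList.foldl
      (fun (st : Bool × Bool × Bool × Bool) c =>
        (st.1 || ("0123456789".toList).contains c,
         st.2.1 || c == '\'',
         st.2.2.1 || PySem.Chars.lowerChar c != c,
         st.2.2.2 || PySem.Chars.upperChar c != c))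
      (false, false, false, false))

-- ===== PRECONDITION & SPEC =====
def Spec_cap_feature (s : String) (out : Int) : Prop := out = cap_feature_alt s
instance (s : String) (out : Int) : Decidable (Spec_cap_feature s out) := by unfold Spec_cap_feature; infer_instance

-- ===== CLAIM (what is proved, stated in full; the proofs are below) =====
def Claim_equal_cap_feature : Prop := ∀ (s : String), Dom_cap_feature s → Spec_cap_feature s (cap_feature s)

-- ===== LEMMAS AND PROOFS =====

-- a character whose lowercase differs from itself is an ASCII uppercase letter,
-- hence its own uppercase (PySem's case maps are the ASCII ones)
theorem pv_upper_eq_of_lower_ne (c : Char) (h : PySem.Chars.lowerChar c ≠ c) :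
    PySem.Chars.upperChar c = c := by
  by_cases hu : PySem.Chars.isupper c = true
  · have hl : PySem.Chars.islower c = false := by
      unfold PySem.Chars.isupper at hu
      unfold PySem.Chars.islower
      simp only [Bool.and_eq_true, decide_eq_true_eq, Char.le_def,
        UInt32.le_iff_toNat_le] at hu
      have h1 : 'A'.val.toNat = 65 := by decide
      have h2 : 'Z'.val.toNat = 90 := by decide
      have h3 : 'a'.val.toNat = 97 := by decide
      simp only [Bool.and_eq_false_iff, decide_eq_false_iff_not, Char.le_def, not_le,
        UInt32.le_iff_toNat_le]
      left
      omega
    unfold PySem.Chars.upperChar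
    simp [hl]
  · exfalso
    apply h
    unfold PySem.Chars.lowerChar
    simp [hu]

theorem pv_map_eq_self (f : Char → Char) (l : List Char) :
    (List.map f l = l) ↔ ∀ c ∈ l, f c = c := by
  induction l with
  | nil => simp
  | cons x xs ih => simp [ih]

theorem pv_sum_if_pos {α : Type} (p : α → Bool) (l : List α) :
    (0 < (l.map fun a => if p a then (1 : Int) else 0).sum) ↔ ∃ a ∈ l, p a = true := by
  induction l with
  | nil => simp
  | cons x xs ih =>
    have hnn : 0 ≤ (xs.map fun a => if p a then (1 : Int) else 0).sum := by
      apply List.sum_nonneg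
      intro a ha
      simp only [List.mem_map] at ha
      obtain ⟨b, -, hb⟩ := ha
      subst hb
      split <;> simp
    by_cases h : p x = true <;> simp [h, ih] <;> omega

-- `sub in s` for a one-character sub is membership of that character
theorem pv_isIn_single (c : Char) (t s : String) (h : t.toList = [c]) :
    PySem.Str.isIn t s = s.toList.contains c := by
  rw [Bool.eq_iff_iff, PySem.Str.isIn_iff_infix, h]
  constructor
  · intro hinf
    simp only [List.contains_eq_mem, decide_eq_true_eq]
    exact (List.singleton_sublist).mp hinf.sublist
  · intro hm
    simp only [List.contains_eq_mem, decide_eq_true_eq] at hm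
    obtain ⟨l1, l2, hsplit⟩ := List.append_of_mem hm
    exact ⟨l1, l2, by simp [hsplit]⟩

-- the one-pass fold computes the four `any` flags
theorem pv_quad_fold {α : Type} (p1 p2 p3 p4 : α → Bool) (l : List α) (a b c d : Bool) :
    l.foldl (fun (st : Bool × Bool × Bool × Bool) x =>
      (st.1 || p1 x, st.2.1 || p2 x, st.2.2.1 || p3 x, st.2.2.2 || p4 x)) (a, b, c, d)
    = (a || l.any p1, b || l.any p2, c || l.any p3, d || l.any p4) := by
  induction l generalizing a b c d with
  | nil => simp
  | cons x xs ih => simp [List.foldl_cons, ih, Bool.or_assoc]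

-- A's digit scan (any of "0".."9" a substring) agrees with B's per-character flag
theorem pv_digit_eq (s : String) :
    (0 < pvDigitSum s) ↔ (s.toList.any fun c => ("0123456789".toList).contains c) = true := by
  unfold pvDigitSum
  rw [pv_sum_if_pos]
  have hrange : PySem.List.pyRange 0 10 1 = [0, 1, 2, 3, 4, 5, 6, 7, 8, 9] := by decide
  rw [hrange]
  have hds : ("0123456789".toList) = ['0','1','2','3','4','5','6','7','8','9'] := by decide
  rw [hds]
  simp only [List.any_eq_true, List.contains_eq_mem, decide_eq_true_eq]
  constructor
  · rintro ⟨d, hd, hin⟩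
    fin_cases hd <;>
      [ rw [pv_isIn_single '0' _ _ (by decide)] at hin;
        rw [pv_isIn_single '1' _ _ (by decide)] at hin;
        rw [pv_isIn_single '2' _ _ (by decide)] at hin;
        rw [pv_isIn_single '3' _ _ (by decide)] at hin;
        rw [pv_isIn_single '4' _ _ (by decide)] at hin;
        rw [pv_isIn_single '5' _ _ (by decide)] at hin;
        rw [pv_isIn_single '6' _ _ (by decide)] at hin;
        rw [pv_isIn_single '7' _ _ (by decide)] at hin;
        rw [pv_isIn_single '8' _ _ (by decide)] at hin;
        rw [pv_isIn_single '9' _ _ (by decide)] at hin ] <;>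
      simp only [List.contains_eq_mem, decide_eq_true_eq] at hin <;>
      exact ⟨_, hin, by decide⟩
  · rintro ⟨c, hc, hmem⟩
    fin_cases hmem
    · exact ⟨0, by decide, by rw [pv_isIn_single '0' _ _ (by decide)]; simp [hc]⟩
    · exact ⟨1, by decide, by rw [pv_isIn_single '1' _ _ (by decide)]; simp [hc]⟩
    · exact ⟨2, by decide, by rw [pv_isIn_single '2' _ _ (by decide)]; simp [hc]⟩
    · exact ⟨3, by decide, by rw [pv_isIn_single '3' _ _ (by decide)]; simp [hc]⟩
    · exact ⟨4, by decide, by rw [pv_isIn_single '4' _ _ (by decide)]; simp [hc]⟩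
    · exact ⟨5, by decide, by rw [pv_isIn_single '5' _ _ (by decide)]; simp [hc]⟩
    · exact ⟨6, by decide, by rw [pv_isIn_single '6' _ _ (by decide)]; simp [hc]⟩
    · exact ⟨7, by decide, by rw [pv_isIn_single '7' _ _ (by decide)]; simp [hc]⟩
    · exact ⟨8, by decide, by rw [pv_isIn_single '8' _ _ (by decide)]; simp [hc]⟩
    · exact ⟨9, by decide, by rw [pv_isIn_single '9' _ _ (by decide)]; simp [hc]⟩

theorem pv_zip_map_self (f : Char → Char) (l : List Char) :
    (l.map f).zip l = l.map (fun c => (f c, c)) := by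
  induction l with
  | nil => simp
  | cons x xs ih => simp [ih]

-- `s.lower() == s` is the absence of characters whose lowercase differs (same for upper)
theorem pv_lower_eq (s : String) :
    (PySem.Str.lower s == s) = !(s.toList.any fun c => PySem.Chars.lowerChar c != c) := by
  rw [Bool.eq_iff_iff]
  rw [beq_iff_eq, ← String.toList_inj, PySem.Str.toList_lower]
  unfold PySem.Chars.lower
  rw [pv_map_eq_self]
  simp

theorem pv_upper_eq (s : String) :
    (PySem.Str.upper s == s) = !(s.toList.any fun c => PySem.Chars.upperChar c != c) := by
  rw [Bool.eq_iff_iff]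
  rw [beq_iff_eq, ← String.toList_inj, PySem.Str.toList_upper]
  unfold PySem.Chars.upper
  rw [pv_map_eq_self]
  simp

-- A's characterization always returns `some`, namely B's cap value
theorem pv_capChar_eq (s : String) :
    ∃ k : Int, pvCapCharacterization s = some k ∧
      pvCapOf s (s.toList.any fun c => PySem.Chars.lowerChar c != c)
                (s.toList.any fun c => PySem.Chars.upperChar c != c) = k := by
  have eL := pv_lower_eq s
  have eU := pv_upper_eq s
  unfold pvCapCharacterization pvCapOf
  by_cases h1 : (PySem.Str.lower s == s) = true
  · exact ⟨0, by rw [if_pos h1], by rw [if_pos (by rw [← eL]; exact h1)]⟩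
  · have hU : (s.toList.any fun c => PySem.Chars.lowerChar c != c) = true := by
      have := eq_false_of_ne_true h1
      rw [eL] at this
      simpa using this
    by_cases h2 : (PySem.Str.upper s == s) = true
    · refine ⟨1, by rw [if_neg h1, if_pos h2], ?_⟩
      rw [if_neg (by rw [hU]; decide), if_pos (by rw [← eU]; exact h2)]
    · have hL : (s.toList.any fun c => PySem.Chars.upperChar c != c) = true := by
        have := eq_false_of_ne_true h2
        rw [eU] at this
        simpa using this
      have hne : s.toList ≠ [] := by
        intro hnil
        rw [hnil] at hU
        simp at hU
      obtain ⟨c0, l', hcons⟩ := List.exists_cons_of_ne_nil hne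
      have hget : PySem.Str.pyGet? s 0 = some c0 := by
        simp [hcons, PySem.List.pyGet?, PySem.List.pyIdx?]
      rw [if_neg h1, if_neg h2]
      simp only [hget]
      rw [if_neg (show ¬((!s.toList.any fun c => PySem.Chars.lowerChar c != c) = true) by
            rw [hU]; decide),
          if_neg (show ¬((!s.toList.any fun c => PySem.Chars.upperChar c != c) = true) by
            rw [hL]; decide)]
      by_cases hc0 : (PySem.Chars.upperChar c0 == c0) = true
      · exact ⟨2, by rw [if_pos hc0], by rw [if_pos hc0]⟩
      · have hz : 0 < (((PySem.Str.upper s).toList.zip s.toList).map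
            (fun p => if p.1 == p.2 then (1 : Int) else 0)).sum := by
          have hup : (PySem.Str.upper s).toList = s.toList.map PySem.Chars.upperChar := by
            rw [PySem.Str.toList_upper]
            rfl
          rw [hup, pv_zip_map_self]
          obtain ⟨c, hcmem, hcne⟩ : ∃ c ∈ s.toList, PySem.Chars.lowerChar c ≠ c := by
            simpa [List.any_eq_true, bne_iff_ne] using hU
          exact (pv_sum_if_pos _ _).mpr
            ⟨(PySem.Chars.upperChar c, c), List.mem_map_of_mem hcmem,
              by simp [pv_upper_eq_of_lower_ne c hcne]⟩
        exact ⟨3, by rw [if_neg hc0, if_pos hz], by rw [if_neg hc0]⟩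

-- ===== VERDICT (by name: the statement is the Claim_ definition above) =====
theorem cap_feature_spec : Claim_equal_cap_feature := by
  intro s _
  unfold Spec_cap_feature cap_feature cap_feature_alt
  by_cases hn : pvIsNumber s = true
  · simp [hn]
  · rw [if_neg hn, if_neg hn, pv_quad_fold]
    simp only [Bool.false_or]
    obtain ⟨k, hA, hB⟩ := pv_capChar_eq s
    rw [hA]
    simp only [Option.getD_some]
    unfold pvAfterFlags
    simp only []
    rw [hB]
    have hap : PySem.Str.isIn "'" s = (s.toList.any fun c => c == '\'') := by
      rw [pv_isIn_single '\'' _ _ (by decide), Bool.eq_iff_iff]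
      simp only [List.contains_eq_mem, decide_eq_true_eq, List.any_eq_true, beq_iff_eq]
      exact ⟨fun h => ⟨_, h, rfl⟩, fun ⟨c, hc, e⟩ => e ▸ hc⟩
    rw [if_congr (pv_digit_eq s) rfl rfl, hap]
    by_cases h1 : (s.toList.any fun c => ("0123456789".toList).contains c) = true <;>
      by_cases h2 : (s.toList.any fun c => c == '\'') = true <;>
      simp only [h1, h2, Bool.false_eq_true, if_true, if_false] <;>
      omega
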